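-- pv_equiv track=rewrite | github.com/M1moreno/EntregasBD | tercerTrabajo/Uno.py | atributosComun
-- ===== SOURCE A (Python) =====
-- def atributosComun(tabla1,tabla2):
--     tablaNueva = {}
--     #Lista atributos tabla 1:
--     atributosUno = list(tabla1.keys())
--     #Lista atributos tabla 2:
--     atributosDos = list(tabla2.keys())
--     #Agregamos los atributos de la tabla 1
--     for key in tabla1:
--         tablaNueva.update({key:tabla1[key]})
--     #Vamos a encontrar los atributos en común:
--     atributosComun = []
--     for i in range(0,len(atributosDos)):
--         if atributosDos[i] in atributosUno:
--             atributosComun.append(atributosDos[i])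
--     #Vamos a encontar los atributos que NO son comunes:
--     atributosNoComun = []
--     for i in range(0,len(atributosDos)):
--         if atributosDos[i] not in atributosUno:
--             atributosNoComun.append(atributosDos[i])
--     #Agregamos los atributos de la tabla 2 que no están en la 1
--     for key in atributosNoComun:
--         tablaNueva.update({key:[]})
--     #Tuplas de la tabla 2 NO COMUNES(Toma el mismo estilo de las anteriores veces)
--     tuplaDosNoComun = []
--     for i in range(0,len(tabla2[atributosDos[0]])):
--         tupla = []
--         for key in atributosNoComun:
--             tupla.append(tabla2[key][i])
--         tuplaDosNoComun.append(tupla)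
--     #Valores de cada tupla, pero solamente se toman de los atributos COMUNES
--     tuplaUnoComun = []
--     for i in range(0,len(tabla1[atributosUno[0]])):
--         #La tupla i de la tabla
--         tupla = []
--         #Agregamos los valores DE LOS ATRIBUTOS EN COMUN DE DICHA TUPLA
--         for key in atributosComun:
--             tupla.append(tabla1[key][i])
--         tuplaUnoComun.append(tupla)
--     #Hacemos lo mismo con la tabla dos (no comentaré por ser un comportamiento similar)
--     tuplaDosComun = []
--     for i in range(0,len(tabla2[atributosDos[0]])):
--         tupla = []
--         for key in atributosComun:
--             tupla.append(tabla2[key][i])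
--         tuplaDosComun.append(tupla)
--     #En caso de que los valores de los atributos en común de la tabla 1 (respecto la tupla en donde se esté) esté presente en la tabla 2 entonces se hará natural join. (En caso de que no esté se introduce NULL)
--     for i in range(0,len(tuplaUnoComun)):
--         #¿Están estos valores de la tupla (según el atributo en común) en la otra tabla?
--         if tuplaUnoComun[i] in tuplaDosComun:
--             #Obtenemos la posición de la tuplaDosNoComun
--             posicion = 0
--             #El for para encontrarlo
--             for k in range(0,len(tuplaDosComun)):
--                 if tuplaDosComun[k] == tuplaUnoComun[i]:
--                     posicion = k
--             contador = 0
--             #Entonces metalo en los atributos que estaban en la tabla 2 pero no en la 1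
--             for key in atributosNoComun:
--                 tablaNueva[key].append(tuplaDosNoComun[posicion][contador])
--                 contador += 1
--         #¿No están? Entonces meta NULL en esos valores.
--         else:
--             for key in atributosNoComun:
--                 tablaNueva[key].append("NULL")
--     return tablaNueva
-- ===== SOURCE B (Python) =====
-- def atributosComun(tabla1, tabla2):
--     # hash-join: index table2's common-value tuples to their LAST row, O(1) per row of table1
--     comunes = [k for k in tabla2 if k in tabla1]
--     noComunes = [k for k in tabla2 if k not in tabla1]
--     rows2 = len(tabla2[next(iter(tabla2))])
--     idx = {}
--     for j in range(rows2):
--         idx[tuple(tabla2[k][j] for k in comunes)] = j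
--     rows1 = len(tabla1[next(iter(tabla1))])
--     js = [idx.get(tuple(tabla1[c][i] for c in comunes)) for i in range(rows1)]
--     nueva = dict(tabla1)
--     for k in noComunes:
--         col2 = tabla2[k]
--         nueva[k] = [col2[j] if j is not None else "NULL" for j in js]
--     return nueva
-- ===== Notes on version B (the rewrite author's own statement) =====
-- stated objective: faster
-- what changed: B replaces A's per-row linear scan of table2's common-value tuples (plus A's separate membership scan and interleaved per-row appends) by a dict built once mapping each common-value tuple of table2 to its last row index, building each new column directly with O(1) lookups.
import Mathlib
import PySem

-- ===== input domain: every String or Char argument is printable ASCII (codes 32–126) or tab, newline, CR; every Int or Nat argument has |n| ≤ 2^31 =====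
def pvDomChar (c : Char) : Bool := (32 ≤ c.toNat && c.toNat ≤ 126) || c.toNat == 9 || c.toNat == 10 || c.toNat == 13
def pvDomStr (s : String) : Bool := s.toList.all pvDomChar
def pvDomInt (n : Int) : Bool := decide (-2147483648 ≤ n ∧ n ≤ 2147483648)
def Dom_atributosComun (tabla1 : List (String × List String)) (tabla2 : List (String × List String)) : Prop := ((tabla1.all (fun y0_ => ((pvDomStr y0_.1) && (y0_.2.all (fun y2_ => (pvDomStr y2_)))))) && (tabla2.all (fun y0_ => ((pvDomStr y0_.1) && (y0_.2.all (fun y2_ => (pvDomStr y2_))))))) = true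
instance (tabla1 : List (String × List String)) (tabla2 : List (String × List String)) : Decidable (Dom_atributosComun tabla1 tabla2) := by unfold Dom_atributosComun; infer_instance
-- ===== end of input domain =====

-- B replaces A's quadratic per-row scan of table2's common-value tuples by a dict built once
-- that maps each common-value tuple of table2 to its LAST row index (Python's last-match rule),
-- and builds the new columns directly instead of interleaved appends. Objective: faster (O(n+m) vs O(n*m)).

-- ===== PORT A =====
-- Literal transliteration of A. dict → PySem.Dict; 'for i in range(0,len(xs))' → foldl over
-- PySem.List.pyRange with PySem.List.pyGetD (indices are always in range there, so pyGetD with a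
-- junk default is exact); 'tablaNueva[key].append(v)' → Dict.modify key [] (· ++ [v]), exact
-- because every such key was inserted before (Python would raise KeyError otherwise).
def atributosComun (tabla1 : List (String × List String)) (tabla2 : List (String × List String)) : List (String × List String) :=
  let t1 : PySem.Dict String (List String) := ⟨tabla1⟩
  let t2 : PySem.Dict String (List String) := ⟨tabla2⟩
  let atributosUno := t1.keys
  let atributosDos := t2.keys
  let tablaNueva := atributosUno.foldl (fun d key => d.insert key (t1.getD key [])) PySem.Dict.empty
  let comun := (PySem.List.pyRange 0 (PySem.List.len atributosDos)).foldl
      (fun acc i => if PySem.List.pyGetD atributosDos i "" ∈ atributosUno then acc ++ [PySem.List.pyGetD atributosDos i ""] else acc) []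
  let noComun := (PySem.List.pyRange 0 (PySem.List.len atributosDos)).foldl
      (fun acc i => if PySem.List.pyGetD atributosDos i "" ∉ atributosUno then acc ++ [PySem.List.pyGetD atributosDos i ""] else acc) []
  let tablaNueva := noComun.foldl (fun d key => d.insert key []) tablaNueva
  let tuplaDosNoComun := (PySem.List.pyRange 0 (PySem.List.len (t2.getD (PySem.List.pyGetD atributosDos 0 "") []))).foldl
      (fun acc i => acc ++ [noComun.foldl (fun tupla key => tupla ++ [PySem.List.pyGetD (t2.getD key []) i ""]) []]) []
  let tuplaUnoComun := (PySem.List.pyRange 0 (PySem.List.len (t1.getD (PySem.List.pyGetD atributosUno 0 "") []))).foldl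
      (fun acc i => acc ++ [comun.foldl (fun tupla key => tupla ++ [PySem.List.pyGetD (t1.getD key []) i ""]) []]) []
  let tuplaDosComun := (PySem.List.pyRange 0 (PySem.List.len (t2.getD (PySem.List.pyGetD atributosDos 0 "") []))).foldl
      (fun acc i => acc ++ [comun.foldl (fun tupla key => tupla ++ [PySem.List.pyGetD (t2.getD key []) i ""]) []]) []
  let tablaNueva := (PySem.List.pyRange 0 (PySem.List.len tuplaUnoComun)).foldl (fun d i =>
      if PySem.List.pyGetD tuplaUnoComun i [] ∈ tuplaDosComun then
        let posicion := (PySem.List.pyRange 0 (PySem.List.len tuplaDosComun)).foldl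
            (fun p k => if PySem.List.pyGetD tuplaDosComun k [] = PySem.List.pyGetD tuplaUnoComun i [] then k else p) 0
        (noComun.foldl (fun (dc : PySem.Dict String (List String) × Int) key =>
            (dc.1.modify key [] (fun l => l ++ [PySem.List.pyGetD (PySem.List.pyGetD tuplaDosNoComun posicion []) dc.2 ""]), dc.2 + 1)) (d, 0)).1
      else
        noComun.foldl (fun d key => d.modify key [] (fun l => l ++ ["NULL"])) d) tablaNueva
  tablaNueva.items

-- ===== PORT B =====
-- Transliteration of Source B: hash-join. 'next(iter(t))' → keys.headD ""; the comprehension filters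
-- → List.filter; idx dict keyed by the common-value tuple (last row index wins, as Python's
-- overwriting insert does); fresh-key assignments to dict(tabla1) → list append.
def atributosComun_alt (tabla1 : List (String × List String)) (tabla2 : List (String × List String)) : List (String × List String) :=
  let t1 : PySem.Dict String (List String) := ⟨tabla1⟩
  let t2 : PySem.Dict String (List String) := ⟨tabla2⟩
  let comunes := t2.keys.filter (fun k => t1.contains k)
  let noComunes := t2.keys.filter (fun k => !t1.contains k)
  let rows2 := (t2.getD (t2.keys.headD "") []).length
  let idx : PySem.Dict (List String) Int := (PySem.List.pyRange 0 (rows2 : Int)).foldl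
      (fun d j => d.insert (comunes.map (fun k => PySem.List.pyGetD (t2.getD k []) j "")) j) PySem.Dict.empty
  let rows1 := (t1.getD (t1.keys.headD "") []).length
  let js : List (Option Int) := (PySem.List.pyRange 0 (rows1 : Int)).map
      (fun i => idx.get? (comunes.map (fun c => PySem.List.pyGetD (t1.getD c []) i "")))
  tabla1 ++ noComunes.map (fun k =>
    (k, js.map (fun j => match j with
        | some j => PySem.List.pyGetD (t2.getD k []) j ""
        | none => "NULL")))

-- ===== PRECONDITION & SPEC =====
-- Pre_ = exactly the inputs on which the Python A returns normally: both tables non-empty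
-- (A indexes keys[0] — IndexError otherwise), every column of tabla2 at least as long as its
-- first column and every column of tabla1 shared with tabla2 at least as long as tabla1's first
-- column (A indexes those columns at every row index of the first column — IndexError otherwise).
-- Duplicate keys are also excluded: a Python dict cannot carry them, so this excludes no input
-- the Python programs can receive.
def Pre_atributosComun (tabla1 : List (String × List String)) (tabla2 : List (String × List String)) : Prop :=
  tabla1 ≠ [] ∧ tabla2 ≠ [] ∧
  (tabla1.map Prod.fst).Nodup ∧ (tabla2.map Prod.fst).Nodup ∧
  (∀ p ∈ tabla2, (tabla2.headD ("", [])).2.length ≤ p.2.length) ∧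
  (∀ p ∈ tabla1, p.1 ∈ tabla2.map Prod.fst → (tabla1.headD ("", [])).2.length ≤ p.2.length)
instance (tabla1 : List (String × List String)) (tabla2 : List (String × List String)) : Decidable (Pre_atributosComun tabla1 tabla2) := by unfold Pre_atributosComun; infer_instance

def pvWitness_atributosComun : (List (String × List String)) × (List (String × List String)) :=
  ([("a", ["x", "y"]), ("b", ["u", "v"])], [("b", ["v", "u"]), ("c", ["1", "2"])])

def Spec_atributosComun (tabla1 : List (String × List String)) (tabla2 : List (String × List String)) (out : List (String × List String)) : Prop := out = atributosComun_alt tabla1 tabla2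
instance (tabla1 : List (String × List String)) (tabla2 : List (String × List String)) (out : List (String × List String)) : Decidable (Spec_atributosComun tabla1 tabla2 out) := by unfold Spec_atributosComun; infer_instance

-- ===== CLAIM (what is proved, stated in full; the proofs are below) =====
def Claim_equal_atributosComun : Prop := ∀ (tabla1 : List (String × List String)) (tabla2 : List (String × List String)), Dom_atributosComun tabla1 tabla2 → Pre_atributosComun tabla1 tabla2 → Spec_atributosComun tabla1 tabla2 (atributosComun tabla1 tabla2)

-- ===== LEMMAS AND PROOFS =====

def pvKey (t : PySem.Dict String (List String)) (C : List String) (i : Int) : List String :=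
  C.map (fun k => PySem.List.pyGetD (t.getD k []) i "")
def pvPos (t2 : PySem.Dict String (List String)) (C : List String) (n : Nat) (t : List String) : Int :=
  (PySem.List.pyRange 0 (n : Int)).foldl (fun p kk => if pvKey t2 C kk = t then kk else p) 0
def pvIdx (t2 : PySem.Dict String (List String)) (C : List String) (n : Nat) : PySem.Dict (List String) Int :=
  (PySem.List.pyRange 0 (n : Int)).foldl (fun d j => d.insert (pvKey t2 C j) j) PySem.Dict.empty

theorem pvRange_succ (m : Nat) :
    PySem.List.pyRange 0 ((m + 1 : Nat) : Int) = PySem.List.pyRange 0 (m : Int) ++ [(m : Int)] := by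
  push_cast
  exact PySem.List.pyRange_one_succ_right (Int.natCast_nonneg m)

theorem pvLookup_last (t2 : PySem.Dict String (List String)) (C : List String) (n : Nat) (t : List String) :
    (pvIdx t2 C n).get? t =
      if t ∈ (PySem.List.pyRange 0 (n : Int)).map (pvKey t2 C) then some (pvPos t2 C n t) else none := by
  induction n with
  | zero => simp [pvIdx, PySem.List.pyRange, PySem.Dict.get?_empty]
  | succ m ih =>
    unfold pvIdx pvPos at *
    rw [pvRange_succ m]
    simp only [List.foldl_append, List.foldl_cons, List.foldl_nil, List.map_append, List.map_cons,
      List.map_nil, List.mem_append, List.mem_cons]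
    rw [PySem.Dict.get?_insert]
    by_cases h1 : pvKey t2 C (m : Int) = t
    · rw [if_pos h1.symm, if_pos (by right; left; exact h1.symm), if_pos h1]
    · rw [if_neg (fun hh => h1 hh.symm), if_neg h1, ih]
      by_cases h2 : t ∈ (PySem.List.pyRange 0 (m : Int)).map (pvKey t2 C)
      · rw [if_pos h2, if_pos (by left; exact h2)]
      · rw [if_neg h2, if_neg (by rintro (h | h | h); exacts [h2 h, h1 h.symm, (List.not_mem_nil h).elim])]

theorem pvPos_mem (t2 : PySem.Dict String (List String)) (C : List String) (n : Nat) (t : List String)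
    (h : t ∈ (PySem.List.pyRange 0 (n : Int)).map (pvKey t2 C)) :
    0 ≤ pvPos t2 C n t ∧ pvPos t2 C n t < n ∧ pvKey t2 C (pvPos t2 C n t) = t := by
  induction n with
  | zero => simp [PySem.List.pyRange] at h
  | succ m ih =>
    unfold pvPos at *
    rw [pvRange_succ m] at *
    simp only [List.foldl_append, List.foldl_cons, List.foldl_nil] at *
    by_cases h1 : pvKey t2 C (m : Int) = t
    · rw [if_pos h1]
      exact ⟨Int.natCast_nonneg m, by push_cast; omega, h1⟩
    · have h2 : t ∈ (PySem.List.pyRange 0 (m : Int)).map (pvKey t2 C) := by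
        simp only [List.map_append, List.map_cons, List.map_nil, List.mem_append,
          List.mem_cons] at h
        rcases h with h | h | h
        exacts [h, absurd h.symm h1, (List.not_mem_nil h).elim]
      rcases ih h2 with ⟨a, b, c⟩
      rw [if_neg h1]
      exact ⟨a, by push_cast; omega, c⟩

theorem pvCounterFold_getD (ks : List String) (hnd : ks.Nodup) (h : Int → String)
    (d : PySem.Dict String (List String)) (c0 : Int) (k : String) :
    ((ks.foldl (fun dc key => (dc.1.modify key [] (fun l => l ++ [h dc.2]), dc.2 + 1)) (d, c0)).1).getD k []
      = d.getD k [] ++ (if k ∈ ks then [h (c0 + (ks.idxOf k : Int))] else []) := by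
  induction ks generalizing d c0 with
  | nil => simp
  | cons a tl ih =>
    simp only [List.foldl_cons]
    rw [ih (by simp_all) _ _]
    by_cases hk : k = a
    · subst hk
      have hkt : k ∉ tl := by simp_all
      rw [if_neg hkt, if_pos (by simp)]
      rw [PySem.Dict.getD_modify]
      simp [List.idxOf_cons_self]
    · rw [PySem.Dict.getD_modify, if_neg hk]
      by_cases hkt : k ∈ tl
      · rw [if_pos hkt, if_pos (by simp [hkt])]
        rw [List.idxOf_cons_ne _ (by exact fun hh => hk hh.symm)]
        push_cast
        ring_nf
      · rw [if_neg hkt, if_neg (by simp [hkt, hk])]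

theorem pvCounterFold_keys (ks : List String) (h : Int → String)
    (d : PySem.Dict String (List String)) (c0 : Int) (hk : ∀ k ∈ ks, k ∈ d.keys) :
    ((ks.foldl (fun dc key => (dc.1.modify key [] (fun l => l ++ [h dc.2]), dc.2 + 1)) (d, c0)).1).keys = d.keys := by
  induction ks generalizing d c0 with
  | nil => rfl
  | cons a tl ih =>
    simp only [List.foldl_cons]
    have hka : (d.modify a [] (fun l => l ++ [h c0])).keys = d.keys := by
      rw [PySem.Dict.keys_modify, PySem.Dict.keys_insert_of_contains]
      rw [PySem.Dict.contains_eq_decide_mem_keys]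
      simp [hk a (by simp)]
    rw [ih _ _ (by rw [hka]; exact fun k hkk => hk k (by simp [hkk])), hka]

theorem pvNullFold_getD (ks : List String) (hnd : ks.Nodup)
    (d : PySem.Dict String (List String)) (k : String) :
    (ks.foldl (fun d key => d.modify key [] (fun l => l ++ ["NULL"])) d).getD k []
      = d.getD k [] ++ (if k ∈ ks then ["NULL"] else []) := by
  induction ks generalizing d with
  | nil => simp
  | cons a tl ih =>
    simp only [List.foldl_cons]
    rw [ih (by simp_all) _]
    by_cases hk : k = a
    · subst hk
      rw [if_neg (by simp_all), if_pos (by simp), PySem.Dict.getD_modify]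
      simp
    · rw [PySem.Dict.getD_modify, if_neg hk]
      by_cases hkt : k ∈ tl
      · rw [if_pos hkt, if_pos (by simp [hkt])]
      · rw [if_neg hkt, if_neg (by simp [hkt, hk])]

theorem pvNullFold_keys (ks : List String)
    (d : PySem.Dict String (List String)) (hk : ∀ k ∈ ks, k ∈ d.keys) :
    (ks.foldl (fun d key => d.modify key [] (fun l => l ++ ["NULL"])) d).keys = d.keys := by
  induction ks generalizing d with
  | nil => rfl
  | cons a tl ih =>
    simp only [List.foldl_cons]
    have hka : (d.modify a [] (fun l => l ++ ["NULL"])).keys = d.keys := by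
      rw [PySem.Dict.keys_modify, PySem.Dict.keys_insert_of_contains]
      rw [PySem.Dict.contains_eq_decide_mem_keys]
      simp [hk a (by simp)]
    rw [ih _ (by rw [hka]; exact fun k hkk => hk k (by simp [hkk])), hka]

def pvG (t1 t2 : PySem.Dict String (List String)) (C : List String) (n2 : Nat) (i : Int) (k : String) : String :=
  if pvKey t1 C i ∈ (PySem.List.pyRange 0 (n2 : Int)).map (pvKey t2 C) then
    PySem.List.pyGetD (t2.getD k []) (pvPos t2 C n2 (pvKey t1 C i)) ""
  else "NULL"

def pvStep (t1 t2 : PySem.Dict String (List String)) (C N : List String) (n2 : Nat)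
    (d : PySem.Dict String (List String)) (i : Int) : PySem.Dict String (List String) :=
  if pvKey t1 C i ∈ (PySem.List.pyRange 0 (n2 : Int)).map (pvKey t2 C) then
    (N.foldl (fun dc key => (dc.1.modify key [] (fun l => l ++
        [PySem.List.pyGetD (PySem.List.pyGetD ((PySem.List.pyRange 0 (n2 : Int)).map (pvKey t2 N)) (pvPos t2 C n2 (pvKey t1 C i)) []) dc.2 ""]), dc.2 + 1)) (d, 0)).1
  else N.foldl (fun d key => d.modify key [] (fun l => l ++ ["NULL"])) d

theorem pvGet_map_range {α : Type} (n : Nat) (f : Int → α) (i : Int) (d : α)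
    (h0 : 0 ≤ i) (h1 : i < n) :
    PySem.List.pyGetD ((PySem.List.pyRange 0 (n : Int)).map f) i d = f i := by
  rw [PySem.List.pyGetD_eq_getElem _ _ h0 (by simpa [PySem.List.pyRange_zero_natCast] using h1)]
  simp [PySem.List.pyRange_zero_natCast, List.getElem_map, List.getElem_range, Int.toNat_of_nonneg h0]

theorem pvKey_pyGetD_idxOf (t2 : PySem.Dict String (List String)) (N : List String) (j : Int)
    (k : String) (hk : k ∈ N) :
    PySem.List.pyGetD (pvKey t2 N j) ((N.idxOf k : Nat) : Int) "" = PySem.List.pyGetD (t2.getD k []) j "" := by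
  have hlt : N.idxOf k < N.length := List.idxOf_lt_length_of_mem hk
  rw [PySem.List.pyGetD_eq_getElem _ _ (Int.natCast_nonneg _) (by simp [pvKey]; exact_mod_cast hlt)]
  simp only [pvKey, Int.toNat_natCast, List.getElem_map, List.getElem_idxOf]

theorem pvStep_getD (t1 t2 : PySem.Dict String (List String)) (C N : List String) (n2 : Nat)
    (hN : N.Nodup) (d : PySem.Dict String (List String)) (i : Int) (k : String) :
    (pvStep t1 t2 C N n2 d i).getD k [] = d.getD k [] ++ (if k ∈ N then [pvG t1 t2 C n2 i k] else []) := by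
  unfold pvStep pvG
  by_cases hc : pvKey t1 C i ∈ (PySem.List.pyRange 0 (n2 : Int)).map (pvKey t2 C)
  · rw [if_pos hc, pvCounterFold_getD N hN (fun c => PySem.List.pyGetD (PySem.List.pyGetD ((PySem.List.pyRange 0 (n2 : Int)).map (pvKey t2 N)) (pvPos t2 C n2 (pvKey t1 C i)) []) c "") d 0 k]
    by_cases hk : k ∈ N
    · rw [if_pos hk, if_pos hk, if_pos hc]
      obtain ⟨hp0, hp1, _⟩ := pvPos_mem t2 C n2 _ hc
      rw [zero_add, pvGet_map_range n2 (pvKey t2 N) _ [] hp0 hp1, pvKey_pyGetD_idxOf t2 N _ k hk]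
    · rw [if_neg hk, if_neg hk]
  · rw [if_neg hc, pvNullFold_getD N hN d k]
    by_cases hk : k ∈ N
    · rw [if_pos hk, if_pos hk, if_neg hc]
    · rw [if_neg hk, if_neg hk]

theorem pvStep_keys (t1 t2 : PySem.Dict String (List String)) (C N : List String) (n2 : Nat)
    (d : PySem.Dict String (List String)) (i : Int) (hk : ∀ k ∈ N, k ∈ d.keys) :
    (pvStep t1 t2 C N n2 d i).keys = d.keys := by
  unfold pvStep
  by_cases hc : pvKey t1 C i ∈ (PySem.List.pyRange 0 (n2 : Int)).map (pvKey t2 C)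
  · rw [if_pos hc, pvCounterFold_keys N (fun c => PySem.List.pyGetD (PySem.List.pyGetD ((PySem.List.pyRange 0 (n2 : Int)).map (pvKey t2 N)) (pvPos t2 C n2 (pvKey t1 C i)) []) c "") d 0 hk]
  · rw [if_neg hc, pvNullFold_keys N d hk]

theorem pvRows_getD (t1 t2 : PySem.Dict String (List String)) (C N : List String) (n2 : Nat)
    (hN : N.Nodup) (rows : List Int) (d : PySem.Dict String (List String))
    (hk : ∀ k ∈ N, k ∈ d.keys) (k : String) :
    (rows.foldl (pvStep t1 t2 C N n2) d).getD k []
      = d.getD k [] ++ (if k ∈ N then rows.map (fun i => pvG t1 t2 C n2 i k) else []) := by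
  induction rows generalizing d with
  | nil => simp
  | cons i tl ih =>
    simp only [List.foldl_cons]
    rw [ih _ (by intro k' hk'; rw [pvStep_keys t1 t2 C N n2 d i hk]; exact hk k' hk'),
      pvStep_getD t1 t2 C N n2 hN d i k]
    by_cases hkN : k ∈ N
    · simp [hkN]
    · simp [hkN]

theorem pvRows_keys (t1 t2 : PySem.Dict String (List String)) (C N : List String) (n2 : Nat)
    (rows : List Int) (d : PySem.Dict String (List String)) (hk : ∀ k ∈ N, k ∈ d.keys) :
    (rows.foldl (pvStep t1 t2 C N n2) d).keys = d.keys := by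
  induction rows generalizing d with
  | nil => rfl
  | cons i tl ih =>
    simp only [List.foldl_cons]
    rw [ih _ (by intro k' hk'; rw [pvStep_keys t1 t2 C N n2 d i hk]; exact hk k' hk'),
      pvStep_keys t1 t2 C N n2 d i hk]

theorem pvHead (xs : List String) : PySem.List.pyGetD xs 0 "" = xs.headD "" := by
  cases xs <;> simp [PySem.List.pyGetD, PySem.List.pyGet?, PySem.List.pyIdx?]

theorem pvFoldFilter (xs : List String) (q : String → Bool) :
    (PySem.List.pyRange 0 (xs.length : Int)).foldl
      (fun acc i => if q (PySem.List.pyGetD xs i "") = true then acc ++ [PySem.List.pyGetD xs i ""] else acc) [] = xs.filter q := by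
  rw [PySem.List.foldl_append_if (fun i => q (PySem.List.pyGetD xs i "")) (fun i => PySem.List.pyGetD xs i "")]
  have hm := PySem.List.map_pyGetD_pyRange_zero xs ""
  simp only [PySem.List.len] at hm
  rw [show (fun i => q (PySem.List.pyGetD xs i "")) = (q ∘ fun i => PySem.List.pyGetD xs i "") from rfl,
    ← List.filter_map, hm, List.nil_append]

theorem pvGet_map_key (t : PySem.Dict String (List String)) (Cl : List String) (n : Nat) (i : Int)
    (h0 : 0 ≤ i) (h1 : i < n) :
    PySem.List.pyGetD (List.map (fun x => List.map (fun k => PySem.List.pyGetD (t.getD k []) x "") Cl)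
      (PySem.List.pyRange 0 (n : Int))) i [] = pvKey t Cl i :=
  pvGet_map_range n (pvKey t Cl) i [] h0 h1

theorem pvPos_eq (t2 : PySem.Dict String (List String)) (Cl : List String) (n2 : Nat) (t : List String) :
    List.foldl (fun p k => if PySem.List.pyGetD (List.map (fun x => List.map (fun k' => PySem.List.pyGetD (t2.getD k' []) x "") Cl)
        (PySem.List.pyRange 0 (n2 : Int))) k [] = t then k else p) 0 (PySem.List.pyRange 0 (n2 : Int))
      = pvPos t2 Cl n2 t := by
  unfold pvPos
  apply PySem.List.foldl_congr_mem
  intro acc kk hkk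
  rw [PySem.List.mem_pyRange_one] at hkk
  rw [pvGet_map_key t2 Cl n2 kk hkk.1 hkk.2]

theorem pvMain (tabla1 tabla2 : List (String × List String))
    (hnd1 : (tabla1.map Prod.fst).Nodup) (hnd2 : (tabla2.map Prod.fst).Nodup) :
    atributosComun tabla1 tabla2 = atributosComun_alt tabla1 tabla2 := by
  simp only [atributosComun, atributosComun_alt]
  simp only [PySem.List.len, PySem.List.foldl_append_singleton_eq_map, List.nil_append]
  have hC : List.foldl
      (fun acc i => if PySem.List.pyGetD (⟨tabla2⟩ : PySem.Dict String (List String)).keys i "" ∈ (⟨tabla1⟩ : PySem.Dict String (List String)).keys then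
        acc ++ [PySem.List.pyGetD (⟨tabla2⟩ : PySem.Dict String (List String)).keys i ""] else acc)
      [] (PySem.List.pyRange 0 ((⟨tabla2⟩ : PySem.Dict String (List String)).keys.length : Int))
      = (⟨tabla2⟩ : PySem.Dict String (List String)).keys.filter
          (fun k => (⟨tabla1⟩ : PySem.Dict String (List String)).contains k) := by
    rw [← pvFoldFilter (⟨tabla2⟩ : PySem.Dict String (List String)).keys
        (fun k => (⟨tabla1⟩ : PySem.Dict String (List String)).contains k)]
    apply PySem.List.foldl_congr_mem
    intro acc x _
    rw [PySem.Dict.contains_eq_decide_mem_keys]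
    simp only [decide_eq_true_eq]
  have hN : List.foldl
      (fun acc i => if PySem.List.pyGetD (⟨tabla2⟩ : PySem.Dict String (List String)).keys i "" ∉ (⟨tabla1⟩ : PySem.Dict String (List String)).keys then
        acc ++ [PySem.List.pyGetD (⟨tabla2⟩ : PySem.Dict String (List String)).keys i ""] else acc)
      [] (PySem.List.pyRange 0 ((⟨tabla2⟩ : PySem.Dict String (List String)).keys.length : Int))
      = (⟨tabla2⟩ : PySem.Dict String (List String)).keys.filter
          (fun k => !(⟨tabla1⟩ : PySem.Dict String (List String)).contains k) := by
    rw [← pvFoldFilter (⟨tabla2⟩ : PySem.Dict String (List String)).keys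
        (fun k => !(⟨tabla1⟩ : PySem.Dict String (List String)).contains k)]
    apply PySem.List.foldl_congr_mem
    intro acc x _
    rw [PySem.Dict.contains_eq_decide_mem_keys]
    simp only [Bool.not_eq_eq_eq_not, Bool.not_true, decide_eq_false_iff_not]
  rw [hC, hN, pvHead (⟨tabla1⟩ : PySem.Dict String (List String)).keys, pvHead (⟨tabla2⟩ : PySem.Dict String (List String)).keys]
  simp only [List.length_map, PySem.List.pyRange_zero_natCast, List.length_range]
  simp only [← PySem.List.pyRange_zero_natCast]
  set T1 : PySem.Dict String (List String) := (⟨tabla1⟩ : PySem.Dict String (List String)) with hT1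
  set T2 : PySem.Dict String (List String) := (⟨tabla2⟩ : PySem.Dict String (List String)) with hT2
  set C : List String := T2.keys.filter (fun k => T1.contains k) with hCdef
  set N : List String := T2.keys.filter (fun k => !T1.contains k) with hNdef
  set n1 : Nat := (T1.getD (T1.keys.headD "") []).length with hn1
  set n2 : Nat := (T2.getD (T2.keys.headD "") []).length with hn2
  have hKeys1 : T1.keys = tabla1.map Prod.fst := rfl
  have hItems1 : T1.items = tabla1 := rfl
  have hnd1' : T1.keys.Nodup := by rw [hKeys1]; exact hnd1
  have hnd2' : T2.keys.Nodup := hnd2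
  have hNnd : N.Nodup := hnd2'.filter _
  have hNdisj : ∀ k ∈ N, k ∉ T1.keys := by
    intro k hk
    have := (List.mem_filter.mp hk).2
    rw [PySem.Dict.contains_eq_decide_mem_keys] at this
    simpa using this
  have htab1 : tabla1 = T1.keys.map (fun k => (k, T1.getD k [])) := PySem.Dict.items_eq_map_keys T1 hnd1' []
  -- the initial dict: tabla1's entries, then empty columns for the non-common keys
  have hd0i : (T1.keys.foldl (fun d key => d.insert key (T1.getD key [])) PySem.Dict.empty).items = tabla1 := by
    rw [PySem.Dict.items_foldl_insert_fresh T1.keys (fun a => a) (fun a => T1.getD a []) PySem.Dict.empty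
      (by intro a _; exact PySem.Dict.contains_empty a) (by simpa using hnd1')]
    simp [← htab1, PySem.Dict.empty]
  have hd0k : (T1.keys.foldl (fun d key => d.insert key (T1.getD key [])) PySem.Dict.empty).keys = T1.keys := by
    show List.map _ _ = _
    rw [hd0i]; rfl
  have hd1i : (N.foldl (fun d key => d.insert key [])
      (T1.keys.foldl (fun d key => d.insert key (T1.getD key [])) PySem.Dict.empty)).items
      = tabla1 ++ N.map (fun k => (k, ([] : List String))) := by
    rw [PySem.Dict.items_foldl_insert_fresh N (fun a => a) (fun _ => ([] : List String)) _
      (by intro a ha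
          rw [PySem.Dict.contains_eq_decide_mem_keys, hd0k]
          simpa using hNdisj a ha)
      (by simpa using hNnd)]
    rw [hd0i]
  have hd1k : (N.foldl (fun d key => d.insert key [])
      (T1.keys.foldl (fun d key => d.insert key (T1.getD key [])) PySem.Dict.empty)).keys
      = T1.keys ++ N := by
    show List.map _ _ = _
    rw [hd1i]
    simp only [List.map_append, List.map_map]
    rw [← hKeys1]
    congr 1
    simp [Function.comp_def]
  have hd1nd : (T1.keys ++ N).Nodup := by
    rw [List.nodup_append]
    refine ⟨hnd1', hNnd, ?_⟩
    intro a ha b hb he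
    exact hNdisj b hb (he ▸ ha)
  rw [hKeys1] at hd1nd
  set d1 : PySem.Dict String (List String) := N.foldl (fun d key => d.insert key [])
      (T1.keys.foldl (fun d key => d.insert key (T1.getD key [])) PySem.Dict.empty) with hd1def
  have hd1nd' : d1.keys.Nodup := by rw [hd1def, hd1k, hKeys1]; exact hd1nd
  have hfk : ∀ k ∈ N, k ∈ d1.keys := by
    rw [hd1def, hd1k]
    intro k hk
    exact List.mem_append_right _ hk
  -- rewrite the final row loop into pvStep form
  have hbody : ∀ (d : PySem.Dict String (List String)), ∀ i ∈ PySem.List.pyRange 0 (n1 : Int),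
      (fun d i =>
        if PySem.List.pyGetD (List.map (fun x => List.map (fun x_1 => PySem.List.pyGetD (T1.getD x_1 []) x "") C) (PySem.List.pyRange 0 (n1 : Int))) i [] ∈
            List.map (fun x => List.map (fun x_1 => PySem.List.pyGetD (T2.getD x_1 []) x "") C) (PySem.List.pyRange 0 (n2 : Int)) then
          (List.foldl
              (fun dc key =>
                (dc.1.modify key [] fun l =>
                    l ++
                      [PySem.List.pyGetD
                          (PySem.List.pyGetD
                            (List.map (fun x => List.map (fun x_1 => PySem.List.pyGetD (T2.getD x_1 []) x "") N) (PySem.List.pyRange 0 (n2 : Int)))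
                            (List.foldl
                              (fun p k =>
                                if PySem.List.pyGetD (List.map (fun x => List.map (fun x_1 => PySem.List.pyGetD (T2.getD x_1 []) x "") C) (PySem.List.pyRange 0 (n2 : Int))) k [] =
                                    PySem.List.pyGetD (List.map (fun x => List.map (fun x_1 => PySem.List.pyGetD (T1.getD x_1 []) x "") C) (PySem.List.pyRange 0 (n1 : Int))) i [] then k
                                else p)
                              0 (PySem.List.pyRange 0 (n2 : Int)))
                            [])
                          dc.2 ""],
                  dc.2 + 1))
              (d, 0) N).1
        else List.foldl (fun d key => d.modify key [] fun l => l ++ ["NULL"]) d N) d i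
      = pvStep T1 T2 C N n2 d i := by
    intro d i hi
    rw [PySem.List.mem_pyRange_one] at hi
    simp only
    rw [pvGet_map_key T1 C n1 i hi.1 hi.2, pvPos_eq T2 C n2 (pvKey T1 C i)]
    rfl
  rw [PySem.List.foldl_congr_mem _ _ (pvStep T1 T2 C N n2) _ hbody]
  have hfinkeys : (List.foldl (pvStep T1 T2 C N n2) d1 (PySem.List.pyRange 0 (n1 : Int))).keys = d1.keys :=
    pvRows_keys T1 T2 C N n2 _ d1 hfk
  have hfinnd : (List.foldl (pvStep T1 T2 C N n2) d1 (PySem.List.pyRange 0 (n1 : Int))).keys.Nodup := by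
    rw [hfinkeys]; exact hd1nd'
  rw [PySem.Dict.items_eq_map_keys _ hfinnd [], hfinkeys, hd1def, hd1k, List.map_append]
  rw [← hd1def]
  congr 1
  · -- the tabla1 part is untouched
    have hmc : ∀ k ∈ T1.keys,
        (k, (List.foldl (pvStep T1 T2 C N n2) d1 (PySem.List.pyRange 0 (n1 : Int))).getD k [])
          = (k, T1.getD k []) := by
      intro k hk
      have hkN : k ∉ N := fun hkN => hNdisj k hkN hk
      have : (List.foldl (pvStep T1 T2 C N n2) d1 (PySem.List.pyRange 0 (n1 : Int))).getD k [] = T1.getD k [] := by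
        rw [pvRows_getD T1 T2 C N n2 hNnd _ d1 hfk k, if_neg hkN, List.append_nil]
        have hmem : (k, T1.getD k []) ∈ d1.items := by
          rw [hd1i]
          refine List.mem_append_left _ ?_
          rw [htab1]
          exact List.mem_map.mpr ⟨k, hk, rfl⟩
        exact PySem.Dict.getD_of_mem_items _ hmem hd1nd' []
      rw [this]
    rw [List.map_congr_left hmc, ← htab1]
  · -- the non-common columns
    refine List.map_congr_left (fun k hk => ?_)
    have hgd : (List.foldl (pvStep T1 T2 C N n2) d1 (PySem.List.pyRange 0 (n1 : Int))).getD k []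
        = (PySem.List.pyRange 0 (n1 : Int)).map (fun i => pvG T1 T2 C n2 i k) := by
      rw [pvRows_getD T1 T2 C N n2 hNnd _ d1 hfk k, if_pos hk]
      have hmem : (k, ([] : List String)) ∈ d1.items := by
        rw [hd1i]
        exact List.mem_append_right _ (List.mem_map.mpr ⟨k, hk, rfl⟩)
      rw [PySem.Dict.getD_of_mem_items _ hmem hd1nd' [], List.nil_append]
    rw [hgd, List.map_map]
    refine congrArg _ (List.map_congr_left (fun i _ => ?_))
    show pvG T1 T2 C n2 i k
      = match (pvIdx T2 C n2).get? (pvKey T1 C i) with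
        | some j => PySem.List.pyGetD (T2.getD k []) j ""
        | none => "NULL"
    rw [pvLookup_last T2 C n2 (pvKey T1 C i)]
    unfold pvG
    by_cases hc : pvKey T1 C i ∈ (PySem.List.pyRange 0 (n2 : Int)).map (pvKey T2 C)
    · rw [if_pos hc, if_pos hc]
    · rw [if_neg hc, if_neg hc]

-- ===== VERDICT (by name: the statement is the Claim_ definition above) =====
theorem atributosComun_spec : Claim_equal_atributosComun := by
  intro tabla1 tabla2 _ hpre
  obtain ⟨-, -, hnd1, hnd2, -, -⟩ := hpre
  unfold Spec_atributosComun
  exact pvMain tabla1 tabla2 hnd1 hnd2
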